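-- pv_equiv track=rewrite | github.com/wyk18703232953/myResearch | codeComplex/data/filteredData/python/quadratic/python_quadratic_0099.py | solve
-- ===== SOURCE A (Python) =====
-- from itertools import chain, combinations, permutations
--
-- def powerset(iterable):
--     """
--     powerset([1,2,3]) --> () (1,) (2,) (3,) (1,2) (1,3) (2,3) (1,2,3)
--     """
--     xs = list(iterable)
--     return chain.from_iterable(combinations(xs, r) for r in range(len(xs) + 1))
--
-- def copy_matrix(m):
--     n = len(m)
--     res = []
--     for i in range(n):
--         row = []
--         for j in range(n):
--             row.append(m[i][j])
--         res.append(row)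
--     return res
--
-- def rot90(m):
--     # rotate 90 degrees clockwise
--     n = len(m)
--     res = []
--     for i in range(n):
--         row = []
--         for j in range(n):
--             row.append(m[n - 1 - j][i])
--         res.append(row)
--     return res
--
-- def vert(m):
--     # reverse rows order (flip vertically)
--     n = len(m)
--     res = []
--     for i in range(n):
--         res.append(m[i][::-1])
--     return res
--
-- def gor(m):
--     # reverse columns order (flip horizontally)
--     n = len(m)
--     res = []
--     for i in range(n):
--         row = []
--         for j in range(n):
--             row.append(m[i][n - 1 - j])
--         res.append(row)
--     return res
--
-- def solve(cl1, cl2):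
--     # 原逻辑封装成函数，判断是否可以通过若干变换从 cl1 得到 cl2
--     cm = [rot90, rot90, rot90, vert, gor]
--     cm = list(powerset(cm))
--     if cl1 == cl2:
--         return True
--     for x in cm:
--         for y in permutations(x):
--             t = copy_matrix(cl1)
--             for z in y:
--                 t = z(t)
--             if t == cl2:
--                 return True
--     return False
-- ===== SOURCE B (Python) =====
-- def solve(cl1, cl2):
--     # Check cl2 against the 8 dihedral symmetries of cl1 (as an n x n matrix,
--     # n = len(cl1)) instead of enumerating hundreds of transform compositions.
--     if cl1 == cl2:
--         return True
--     n = len(cl1)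
--     t = [row[:n] for row in cl1]
--     for _ in range(4):
--         t = [[t[n - 1 - j][i] for j in range(n)] for i in range(n)]
--         if t == cl2 or [row[::-1] for row in t] == cl2:
--             return True
--     return False
-- ===== Notes on version B (the rewrite author's own statement) =====
-- stated objective: faster
-- what changed: B replaces A's enumeration of all 326 permutations of subsets of {rot90,rot90,rot90,vert,gor} (each applied to a fresh copy of cl1) by a single loop that rotates the matrix four times and compares cl2 against each rotation and its row-reversed flip, i.e. the 8 dihedral symmetries.
import Mathlib
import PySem

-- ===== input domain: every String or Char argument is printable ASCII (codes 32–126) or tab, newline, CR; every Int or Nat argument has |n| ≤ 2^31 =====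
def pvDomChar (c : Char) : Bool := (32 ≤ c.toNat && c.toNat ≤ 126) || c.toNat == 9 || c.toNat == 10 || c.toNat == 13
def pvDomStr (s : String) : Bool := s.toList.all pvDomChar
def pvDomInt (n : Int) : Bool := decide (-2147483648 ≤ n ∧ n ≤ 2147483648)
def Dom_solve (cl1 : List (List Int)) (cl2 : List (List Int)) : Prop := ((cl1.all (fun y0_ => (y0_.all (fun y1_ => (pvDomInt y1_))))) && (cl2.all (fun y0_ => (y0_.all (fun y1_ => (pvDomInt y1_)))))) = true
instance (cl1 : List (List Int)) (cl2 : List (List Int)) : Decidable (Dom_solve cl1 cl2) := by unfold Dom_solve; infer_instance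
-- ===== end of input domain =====

-- B replaces A's enumeration of 326 transform compositions by a direct check of the
-- 8 dihedral symmetries of cl1 (objective: faster, constant-factor).

-- ===== PORT A =====
-- m[i][j] is ported with pyGetD (default unreachable: Pre_solve excludes every IndexError)
def copy_matrix (m : List (List Int)) : List (List Int) :=
  let n : Int := m.length
  (PySem.List.pyRange 0 n 1).map (fun i =>
    (PySem.List.pyRange 0 n 1).map (fun j =>
      PySem.List.pyGetD (PySem.List.pyGetD m i []) j 0))

def rot90 (m : List (List Int)) : List (List Int) :=
  let n : Int := m.length
  (PySem.List.pyRange 0 n 1).map (fun i =>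
    (PySem.List.pyRange 0 n 1).map (fun j =>
      PySem.List.pyGetD (PySem.List.pyGetD m (n - 1 - j) []) i 0))

-- m[i][::-1]: slice? with step -1 never raises (getD [] is unreachable)
def vert (m : List (List Int)) : List (List Int) :=
  let n : Int := m.length
  (PySem.List.pyRange 0 n 1).map (fun i =>
    (PySem.List.slice? (PySem.List.pyGetD m i []) none none (-1)).getD [])

def gor (m : List (List Int)) : List (List Int) :=
  let n : Int := m.length
  (PySem.List.pyRange 0 n 1).map (fun i =>
    (PySem.List.pyRange 0 n 1).map (fun j =>
      PySem.List.pyGetD (PySem.List.pyGetD m i []) (n - 1 - j) 0))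

-- itertools.combinations(xs, r), in itertools order
def pyCombinations {α : Type} : List α → Nat → List (List α)
  | _, 0 => [[]]
  | [], _ + 1 => []
  | x :: xs, r + 1 => (pyCombinations xs r).map (fun c => x :: c) ++ pyCombinations xs (r + 1)

-- powerset = chain.from_iterable(combinations(xs, r) for r in range(len(xs)+1))
def powerset {α : Type} (xs : List α) : List (List α) :=
  (List.range (xs.length + 1)).flatMap (fun r => pyCombinations xs r)

def solve (cl1 : List (List Int)) (cl2 : List (List Int)) : Bool :=
  let cm : List (List (List Int) → List (List Int)) := [rot90, rot90, rot90, vert, gor]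
  let cm2 := powerset cm
  if cl1 = cl2 then true
  else cm2.any (fun x =>
    (PySem.List.permutations x x.length).any (fun y =>
      decide ((y.foldl (fun t z => z t) (copy_matrix cl1)) = cl2)))

-- ===== PORT B =====
-- t = [[t[n-1-j][i] for j in range(n)] for i in range(n)]
def rotB (n : Int) (t : List (List Int)) : List (List Int) :=
  (PySem.List.pyRange 0 n 1).map (fun i =>
    (PySem.List.pyRange 0 n 1).map (fun j =>
      PySem.List.pyGetD (PySem.List.pyGetD t (n - 1 - j) []) i 0))

-- the 'for _ in range(4)' loop of B, with its two early-return checks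
def altLoop (n : Int) (cl2 : List (List Int)) : Nat → List (List Int) → Bool
  | 0, _ => false
  | k + 1, t =>
    let t' := rotB n t
    if t' = cl2 ∨ t'.map (fun row => (PySem.List.slice? row none none (-1)).getD []) = cl2
    then true
    else altLoop n cl2 k t'

def solve_alt (cl1 : List (List Int)) (cl2 : List (List Int)) : Bool :=
  if cl1 = cl2 then true
  else
    let n : Int := cl1.length
    let t0 := cl1.map (fun row => PySem.List.slice row none (some n))
    altLoop n cl2 4 t0

-- ===== PRECONDITION & SPEC =====
-- Pre_solve is exactly the domain on which the Python A returns: unless cl1 == cl2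
-- (checked before any transform), copy_matrix(cl1) reads cl1[i][j] for all i, j < len(cl1)
-- and raises IndexError as soon as some row of cl1 is shorter than len(cl1).
def Pre_solve (cl1 : List (List Int)) (cl2 : List (List Int)) : Prop :=
  cl1 = cl2 ∨ ∀ row ∈ cl1, cl1.length ≤ row.length
instance (cl1 : List (List Int)) (cl2 : List (List Int)) : Decidable (Pre_solve cl1 cl2) := by
  unfold Pre_solve; infer_instance

def pvWitness_solve : List (List Int) × List (List Int) := ([[1, 2], [3, 4]], [[3, 1], [4, 2]])

def Spec_solve (cl1 : List (List Int)) (cl2 : List (List Int)) (out : Bool) : Prop := out = solve_alt cl1 cl2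
instance (cl1 : List (List Int)) (cl2 : List (List Int)) (out : Bool) : Decidable (Spec_solve cl1 cl2 out) := by unfold Spec_solve; infer_instance

-- ===== CLAIM (what is proved, stated in full; the proofs are below) =====
def Claim_equal_solve : Prop := ∀ (cl1 : List (List Int)) (cl2 : List (List Int)), Dom_solve cl1 cl2 → Pre_solve cl1 cl2 → Spec_solve cl1 cl2 (solve cl1 cl2)

-- ===== LEMMAS AND PROOFS =====

-- proof-only helpers: entries, squareness, the 8 symmetries as a group action

abbrev Mat := List (List Int)

def ent (m : Mat) (i j : Nat) : Int :=
  PySem.List.pyGetD (PySem.List.pyGetD m (i : Int) []) (j : Int) 0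

def Sq (m : Mat) : Prop := ∀ r ∈ m, r.length = m.length

-- shapes
theorem length_rot90 (m : Mat) : (rot90 m).length = m.length := by
  simp [rot90]

theorem sq_rot90 (m : Mat) : Sq (rot90 m) := by
  intro r hr
  simp [rot90] at hr
  obtain ⟨i, _, rfl⟩ := hr
  simp [rot90]

theorem length_vert (m : Mat) : (vert m).length = m.length := by
  simp [vert]

theorem length_gor (m : Mat) : (gor m).length = m.length := by
  simp [gor]

theorem sq_gor (m : Mat) : Sq (gor m) := by
  intro r hr
  simp [gor] at hr
  obtain ⟨i, _, rfl⟩ := hr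
  simp [gor]

theorem length_copy (m : Mat) : (copy_matrix m).length = m.length := by
  simp [copy_matrix]

theorem sq_copy (m : Mat) : Sq (copy_matrix m) := by
  intro r hr
  simp [copy_matrix] at hr
  obtain ⟨i, _, rfl⟩ := hr
  simp [copy_matrix]


theorem row_vert (m : Mat) (i : Nat) (hi : i < m.length) :
    (vert m).getD i [] = (m.getD i []).reverse := by
  simp [vert, PySem.List.slice?_none_none_neg_one, hi, List.getD]


theorem getD_mem_of_lt (m : Mat) (i : Nat) (h : i < m.length) : m.getD i [] ∈ m := by
  rw [List.getD_eq_getElem _ _ h]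
  exact List.getElem_mem h

theorem sq_vert (m : Mat) (h : Sq m) : Sq (vert m) := by
  intro r hr
  obtain ⟨i, hi1, hi2⟩ := List.getElem_of_mem hr
  have hlen : i < m.length := by rw [length_vert] at hi1; exact hi1
  rw [← List.getD_eq_getElem _ [] hi1] at hi2
  rw [row_vert m i hlen] at hi2
  subst hi2
  rw [List.length_reverse, length_vert]
  exact h _ (getD_mem_of_lt m i hlen)

theorem ent_rot90 (m : Mat) (i j : Nat) (hi : i < m.length) (hj : j < m.length) :
    ent (rot90 m) i j = ent m (m.length - 1 - j) i := by
  simp [ent, rot90, hi, hj]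
  rw [show ((m.length : Int) - 1 - j) = ((m.length - 1 - j : Nat) : Int) by omega]
  simp

theorem ent_gor (m : Mat) (i j : Nat) (hi : i < m.length) (hj : j < m.length) :
    ent (gor m) i j = ent m i (m.length - 1 - j) := by
  simp [ent, gor, hi, hj]
  rw [show ((m.length : Int) - 1 - j) = ((m.length - 1 - j : Nat) : Int) by omega]
  simp

theorem ent_copy (m : Mat) (i j : Nat) (hi : i < m.length) (hj : j < m.length) :
    ent (copy_matrix m) i j = ent m i j := by
  simp [ent, copy_matrix, hi, hj]




theorem ent_vert (m : Mat) (h : Sq m) (i j : Nat) (hi : i < m.length) (hj : j < m.length) :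
    ent (vert m) i j = ent m i (m.length - 1 - j) := by
  have hrow : (m.getD i []).length = m.length := h _ (getD_mem_of_lt m i hi)
  simp only [ent, PySem.List.pyGetD_natCast]
  rw [row_vert m i hi]
  simp only [List.getD_eq_getElem?_getD] at hrow ⊢
  rw [List.getElem?_reverse (by omega)]
  rw [show (m[i]?.getD ([] : List Int)).length - 1 - j = m.length - 1 - j by omega]

theorem mat_ext (m1 m2 : Mat) (hl : m1.length = m2.length)
    (h1 : ∀ r ∈ m1, r.length = m2.length) (h2 : ∀ r ∈ m2, r.length = m2.length)
    (he : ∀ i j, i < m2.length → j < m2.length → ent m1 i j = ent m2 i j) : m1 = m2 := by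
  apply List.ext_getElem hl
  intro i hi1 hi2
  have hr1 : m1[i].length = m2.length := h1 _ (List.getElem_mem hi1)
  have hr2 : m2[i].length = m2.length := h2 _ (List.getElem_mem hi2)
  apply List.ext_getElem (by omega)
  intro j hj1 hj2
  have := he i j hi2 (by omega)
  simp only [ent, PySem.List.pyGetD_natCast] at this
  rwa [List.getD_eq_getElem _ _ hi1, List.getD_eq_getElem _ _ hi2,
    List.getD_eq_getElem _ _ hj1, List.getD_eq_getElem _ _ hj2] at this

-- the D4 relations on square matrices
def rpow : Nat → Mat → Mat
  | 0, m => m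
  | k + 1, m => rot90 (rpow k m)

theorem sq_rpow (k : Nat) (m : Mat) (h : Sq m) : Sq (rpow k m) := by
  cases k with
  | zero => exact h
  | succ k => exact sq_rot90 _

theorem rot4 (m : Mat) (h : Sq m) : rot90 (rot90 (rot90 (rot90 m))) = m := by
  apply mat_ext
  · simp [length_rot90]
  · intro r hr
    have := sq_rot90 (rot90 (rot90 (rot90 m))) r hr
    simpa [length_rot90] using this
  · exact h
  · intro i j hi hj
    rw [ent_rot90 _ i j (by simp [length_rot90]; omega) (by simp [length_rot90]; omega)]
    simp only [length_rot90]
    rw [ent_rot90 _ _ _ (by simp [length_rot90]; omega) (by simp [length_rot90]; omega)]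
    simp only [length_rot90]
    rw [ent_rot90 _ _ _ (by simp [length_rot90]; omega) (by simp [length_rot90]; omega)]
    simp only [length_rot90]
    rw [ent_rot90 _ _ _ (by omega) (by omega)]
    congr 1 <;> omega

theorem vert2 (m : Mat) (h : Sq m) : vert (vert m) = m := by
  apply mat_ext
  · simp [length_vert]
  · intro r hr
    have := sq_vert (vert m) (sq_vert m h) r hr
    simpa [length_vert] using this
  · exact h
  · intro i j hi hj
    rw [ent_vert _ (sq_vert m h) i j (by simp [length_vert]; omega) (by simp [length_vert]; omega)]
    simp only [length_vert]
    rw [ent_vert _ h _ _ (by omega) (by omega)]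
    congr 1
    omega

theorem rotvert (m : Mat) (h : Sq m) :
    rot90 (vert m) = vert (rot90 (rot90 (rot90 m))) := by
  apply mat_ext
  · simp [length_rot90, length_vert]
  · intro r hr
    have := sq_rot90 (vert m) r hr
    simpa [length_rot90, length_vert] using this
  · intro r hr
    have := sq_vert _ (sq_rot90 (rot90 (rot90 m))) r hr
    simpa [length_rot90, length_vert] using this
  · intro i j hi hj
    simp only [length_rot90, length_vert] at hi hj
    rw [ent_rot90 _ i j (by simp [length_vert]; omega) (by simp [length_vert]; omega)]
    simp only [length_vert]
    rw [ent_vert _ h _ _ (by omega) (by omega)]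
    rw [ent_vert _ (sq_rot90 _) i j (by simp [length_rot90]; omega) (by simp [length_rot90]; omega)]
    simp only [length_rot90]
    rw [ent_rot90 _ _ _ (by simp [length_rot90]; omega) (by simp [length_rot90]; omega)]
    simp only [length_rot90]
    rw [ent_rot90 _ _ _ (by simp [length_rot90]; omega) (by simp [length_rot90]; omega)]
    simp only [length_rot90]
    rw [ent_rot90 _ _ _ (by omega) (by omega)]
    congr 1 <;> omega

theorem gor_eq_vert (m : Mat) (h : Sq m) : gor m = vert m := by
  apply mat_ext
  · simp [length_gor, length_vert]
  · intro r hr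
    have := sq_gor m r hr
    simpa [length_gor, length_vert] using this
  · intro r hr
    have := sq_vert m h r hr
    simpa [length_vert] using this
  · intro i j hi hj
    simp only [length_vert] at hi hj
    rw [ent_gor _ _ _ hi hj, ent_vert _ h _ _ hi hj]

theorem rpow_add4 (k : Nat) (m : Mat) (h : Sq m) : rpow (k + 4) m = rpow k m := by
  induction k with
  | zero => exact rot4 m h
  | succ k ih => show rot90 (rpow (k + 4) m) = rot90 (rpow k m); rw [ih]

-- symbolic words over the three generator functions
inductive DSym : Type
  | R | V | G
deriving DecidableEq

def evalSym : DSym → Mat → Mat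
  | .R => rot90
  | .V => vert
  | .G => gor

def mulS : DSym → Bool × Fin 4 → Bool × Fin 4
  | .R, (a, b) => (a, if a then b - 1 else b + 1)
  | .V, (a, b) => (!a, b)
  | .G, (a, b) => (!a, b)

def act : Bool × Fin 4 → Mat → Mat
  | (a, b), m => if a then vert (rpow b.val m) else rpow b.val m

theorem act_id (m : Mat) : act (false, 0) m = m := rfl



theorem step (s : DSym) (g : Bool × Fin 4) (m : Mat) (h : Sq m) :
    evalSym s (act g m) = act (mulS s g) m := by
  obtain ⟨a, b⟩ := g
  obtain ⟨bv, hb⟩ := b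
  cases s
  · cases a
    · interval_cases bv
      · rfl
      · rfl
      · rfl
      · exact rpow_add4 0 m h
    · interval_cases bv
      · exact rotvert m h
      · exact (rotvert _ (sq_rpow 1 m h)).trans (congrArg vert (rpow_add4 0 m h))
      · exact (rotvert _ (sq_rpow 2 m h)).trans (congrArg vert (rpow_add4 1 m h))
      · exact (rotvert _ (sq_rpow 3 m h)).trans (congrArg vert (rpow_add4 2 m h))
  · cases a
    · interval_cases bv <;> rfl
    · interval_cases bv <;> exact vert2 _ (sq_rpow _ m h)
  · cases a
    · interval_cases bv <;> exact gor_eq_vert _ (sq_rpow _ m h)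
    · interval_cases bv <;>
        exact (gor_eq_vert _ (sq_vert _ (sq_rpow _ m h))).trans (vert2 _ (sq_rpow _ m h))

theorem foldl_eval (w : List DSym) (g : Bool × Fin 4) (m : Mat) (h : Sq m) :
    w.foldl (fun t z => evalSym z t) (act g m) = act (w.foldl (fun g s => mulS s g) g) m := by
  induction w generalizing g with
  | nil => rfl
  | cons s w ih =>
    simp only [List.foldl_cons]
    rw [step s g m h, ih]

-- the symbolic mirror of A's enumeration
theorem comb_map {α β : Type} (f : α → β) :
    ∀ (l : List α) (r : Nat), pyCombinations (l.map f) r = (pyCombinations l r).map (List.map f) := by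
  intro l
  induction l with
  | nil => intro r; cases r <;> simp [pyCombinations]
  | cons x xs ih =>
    intro r
    cases r with
    | zero => simp [pyCombinations]
    | succ r => simp [pyCombinations, ih, List.map_map, Function.comp]

theorem perms_map {α β : Type} (f : α → β) :
    ∀ (r : Nat) (xs : List α),
      PySem.List.permutations (xs.map f) r = (PySem.List.permutations xs r).map (List.map f) := by
  intro r
  induction r with
  | zero => intro xs; simp [PySem.List.permutations]
  | succ r ih =>
    intro xs
    rw [PySem.List.permutations, PySem.List.permutations]
    simp only [List.length_map, List.map_flatMap]
    refine List.flatMap_congr ?_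
    intro i _
    simp only [List.getElem?_map, List.eraseIdx_map, ih]
    cases xs[i]? <;> simp [List.map_map, Function.comp]

theorem powerset_map {α β : Type} (f : α → β) (xs : List α) :
    powerset (xs.map f) = (powerset xs).map (List.map f) := by
  simp [powerset, comb_map, List.map_flatMap]

def symWords : List (List DSym) :=
  (powerset [DSym.R, DSym.R, DSym.R, DSym.V, DSym.G]).flatMap
    (fun x => PySem.List.permutations x x.length)




theorem solve_eq_sym (cl1 cl2 : Mat) (h : ¬ cl1 = cl2) :
    solve cl1 cl2 =
      symWords.any (fun w =>
        decide ((w.foldl (fun t s => evalSym s t) (copy_matrix cl1)) = cl2)) := by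
  have hcm : ([rot90, rot90, rot90, vert, gor] : List (Mat → Mat)) =
      [DSym.R, DSym.R, DSym.R, DSym.V, DSym.G].map evalSym := rfl
  simp only [solve, if_neg h, symWords, List.any_flatMap, hcm, powerset_map, List.any_map]
  congr 1
  funext x
  simp [perms_map, List.length_map, List.any_map, Function.comp_def, List.foldl_map]

def wordOf : Bool × Fin 4 → List DSym
  | (a, b) => List.replicate b.val DSym.R ++ (if a then [DSym.V] else [])


theorem grp_wordOf : ∀ g, (wordOf g).foldl (fun g s => mulS s g) (false, 0) = g := by decide


theorem wordOf_mem : ∀ g, wordOf g ∈ symWords := by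
  intro g
  apply List.mem_flatMap.mpr
  refine ⟨wordOf g, ?_, ?_⟩
  · obtain ⟨a, b⟩ := g; cases a <;> fin_cases b <;> decide
  · obtain ⟨a, b⟩ := g; cases a <;> fin_cases b <;> decide

theorem exists_g_iff (p : Bool × Fin 4 → Prop) :
    (∃ g, p g) ↔ p (false, 0) ∨ p (true, 0) ∨ p (false, 1) ∨ p (true, 1) ∨
      p (false, 2) ∨ p (true, 2) ∨ p (false, 3) ∨ p (true, 3) := by
  constructor
  · rintro ⟨⟨a, b⟩, hg⟩
    cases a <;> fin_cases b <;> tauto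
  · rintro (h | h | h | h | h | h | h | h) <;> exact ⟨_, h⟩

theorem solveA_iff (cl1 cl2 : Mat) (h : ¬ cl1 = cl2) :
    solve cl1 cl2 = true ↔ ∃ g, act g (copy_matrix cl1) = cl2 := by
  rw [solve_eq_sym cl1 cl2 h]
  simp only [List.any_eq_true, decide_eq_true_eq]
  constructor
  · rintro ⟨w, hw, hval⟩
    refine ⟨w.foldl (fun g s => mulS s g) (false, 0), ?_⟩
    have he := foldl_eval w (false, 0) (copy_matrix cl1) (sq_copy cl1)
    rw [act_id] at he
    rw [← he]
    exact hval
  · rintro ⟨g, hg⟩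
    refine ⟨wordOf g, wordOf_mem g, ?_⟩
    have he := foldl_eval (wordOf g) (false, 0) (copy_matrix cl1) (sq_copy cl1)
    rw [act_id] at he
    rw [he, grp_wordOf g]
    exact hg

-- B side
theorem rotB_eq (n : Int) (t : Mat) (hn : (t.length : Int) = n) : rotB n t = rot90 t := by
  subst hn; rfl

theorem map_rev_eq_vert (t : Mat) :
    t.map (fun row => (PySem.List.slice? row none none (-1)).getD []) = vert t := by
  simp only [PySem.List.slice?_none_none_neg_one, Option.getD_some]
  apply List.ext_getElem (by simp [length_vert])
  intro i hi1 hi2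
  rw [List.getElem_map]
  rw [← List.getD_eq_getElem (vert t) [] hi2, row_vert t i (by rwa [List.length_map] at hi1)]
  rw [List.getD_eq_getElem t [] (by rwa [List.length_map] at hi1)]


theorem altLoop_iff (cl2 m : Mat) (h : Sq m) :
    altLoop (m.length : Int) cl2 4 m = true ↔ ∃ g, act g m = cl2 := by
  have e1 : rotB (m.length : Int) m = rpow 1 m := rotB_eq _ _ rfl
  have l1 : (rpow 1 m).length = m.length := by simp [rpow, length_rot90]
  have e2 : rotB (m.length : Int) (rpow 1 m) = rpow 2 m := rotB_eq _ _ (by rw [l1])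
  have l2 : (rpow 2 m).length = m.length := by simp [rpow, length_rot90]
  have e3 : rotB (m.length : Int) (rpow 2 m) = rpow 3 m := rotB_eq _ _ (by rw [l2])
  have l3 : (rpow 3 m).length = m.length := by simp [rpow, length_rot90]
  have e4 : rotB (m.length : Int) (rpow 3 m) = rpow 4 m := rotB_eq _ _ (by rw [l3])
  have h4 : rpow 4 m = m := rpow_add4 0 m h
  have a0 : act (false, 0) m = m := rfl
  have a1 : act (false, 1) m = rpow 1 m := rfl
  have a2 : act (false, 2) m = rpow 2 m := rfl
  have a3 : act (false, 3) m = rpow 3 m := rfl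
  have b0 : act (true, 0) m = vert m := rfl
  have b1 : act (true, 1) m = vert (rpow 1 m) := rfl
  have b2 : act (true, 2) m = vert (rpow 2 m) := rfl
  have b3 : act (true, 3) m = vert (rpow 3 m) := rfl
  have hout : altLoop (m.length : Int) cl2 4 m = true ↔
      ((rpow 1 m = cl2 ∨ vert (rpow 1 m) = cl2) ∨ (rpow 2 m = cl2 ∨ vert (rpow 2 m) = cl2) ∨
        (rpow 3 m = cl2 ∨ vert (rpow 3 m) = cl2) ∨ (m = cl2 ∨ vert m = cl2)) := by
    simp only [altLoop, e1, e2, e3, e4, h4, map_rev_eq_vert]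
    by_cases c1 : rpow 1 m = cl2 ∨ vert (rpow 1 m) = cl2
    · simp [c1]
    · rw [if_neg c1]
      by_cases c2 : rpow 2 m = cl2 ∨ vert (rpow 2 m) = cl2
      · simp [c1, c2]
      · rw [if_neg c2]
        by_cases c3 : rpow 3 m = cl2 ∨ vert (rpow 3 m) = cl2
        · simp [c1, c2, c3]
        · rw [if_neg c3]
          by_cases c4 : m = cl2 ∨ vert m = cl2
          · simp [c1, c2, c3, c4]
          · rw [if_neg c4]; simp [c1, c2, c3, c4]
  rw [hout, exists_g_iff, a0, a1, a2, a3, b0, b1, b2, b3]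
  constructor
  · rintro ((h | h) | (h | h) | (h | h) | (h | h))
    · exact Or.inr (Or.inr (Or.inl h))
    · exact Or.inr (Or.inr (Or.inr (Or.inl h)))
    · exact Or.inr (Or.inr (Or.inr (Or.inr (Or.inl h))))
    · exact Or.inr (Or.inr (Or.inr (Or.inr (Or.inr (Or.inl h)))))
    · exact Or.inr (Or.inr (Or.inr (Or.inr (Or.inr (Or.inr (Or.inl h))))))
    · exact Or.inr (Or.inr (Or.inr (Or.inr (Or.inr (Or.inr (Or.inr h))))))
    · exact Or.inl h
    · exact Or.inr (Or.inl h)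
  · rintro (h | h | h | h | h | h | h | h)
    · exact Or.inr (Or.inr (Or.inr (Or.inl h)))
    · exact Or.inr (Or.inr (Or.inr (Or.inr h)))
    · exact Or.inl (Or.inl h)
    · exact Or.inl (Or.inr h)
    · exact Or.inr (Or.inl (Or.inl h))
    · exact Or.inr (Or.inl (Or.inr h))
    · exact Or.inr (Or.inr (Or.inl (Or.inl h)))
    · exact Or.inr (Or.inr (Or.inl (Or.inr h)))


theorem trunc_eq_copy (cl1 : Mat) (hrows : ∀ row ∈ cl1, cl1.length ≤ row.length) :
    cl1.map (fun row => PySem.List.slice row none (some (cl1.length : Int))) = copy_matrix cl1 := by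
  apply mat_ext
  · simp [length_copy]
  · intro r hr
    simp only [List.mem_map] at hr
    obtain ⟨row, hrow, rfl⟩ := hr
    rw [PySem.List.slice_to_natCast]
    simp [length_copy]
    exact hrows row hrow
  · intro r hr
    have := sq_copy cl1 r hr
    simpa [length_copy] using this
  · intro i j hi hj
    rw [length_copy] at hi hj
    rw [ent_copy _ _ _ hi hj]
    simp only [ent, PySem.List.pyGetD_natCast]
    have him : i < (cl1.map (fun row => PySem.List.slice row none (some (cl1.length : Int)))).length := by
      rw [List.length_map]; exact hi
    rw [List.getD_eq_getElem _ _ him, List.getElem_map,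
      List.getD_eq_getElem _ _ hi]
    rw [PySem.List.slice_to_natCast]
    have hlenr : cl1.length ≤ cl1[i].length := hrows _ (List.getElem_mem hi)
    rw [List.getD_eq_getElem _ _ (by rw [List.length_take]; omega),
      List.getD_eq_getElem _ _ (by omega)]
    exact List.getElem_take

theorem solve_eq_alt (cl1 cl2 : Mat) (hpre : Pre_solve cl1 cl2) :
    solve cl1 cl2 = solve_alt cl1 cl2 := by
  by_cases hc : cl1 = cl2
  · simp [solve, solve_alt, hc]
  · have hrows : ∀ row ∈ cl1, cl1.length ≤ row.length := hpre.resolve_left hc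
    have hA := solveA_iff cl1 cl2 hc
    have hB : solve_alt cl1 cl2 = true ↔ ∃ g, act g (copy_matrix cl1) = cl2 := by
      simp only [solve_alt, if_neg hc]
      rw [trunc_eq_copy cl1 hrows]
      rw [show (cl1.length : Int) = ((copy_matrix cl1).length : Int) by rw [length_copy]]
      exact altLoop_iff cl2 (copy_matrix cl1) (sq_copy cl1)
    rw [Bool.eq_iff_iff, hA, hB]

-- ===== VERDICT (by name: the statement is the Claim_ definition above) =====
theorem solve_spec : Claim_equal_solve := by
  intro cl1 cl2 _ hpre
  unfold Spec_solve
  exact solve_eq_alt cl1 cl2 hpre
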